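-- pv_equiv track=rewrite | github.com/GundalaNikhil/DSA | dsa-problems/Bitwise/test_all_hidden_testcases.py | bit_008_solution
-- ===== SOURCE A (Python) =====
-- def bit_008_solution(n, k, arr):
--     """BIT-008: Maximize OR K Picks"""
--     from itertools import combinations
--     max_or = 0
--     for combo in combinations(arr, min(k, n)):
--         or_val = 0
--         for num in combo:
--             or_val |= num
--         max_or = max(max_or, or_val)
--     return max_or
-- ===== SOURCE B (Python) =====
-- def bit_008_solution(n, k, arr):
--     """BIT-008: Maximize OR K Picks — set-based DP over reachable OR values per pick count."""
--     r = min(k, n)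
--     dp = [{0}] + [set() for _ in range(r)]
--     for num in arr:
--         dp = [dp[0]] + [cur | {v | num for v in prev} for prev, cur in zip(dp, dp[1:])]
--     best = 0
--     for v in dp[r]:
--         best = max(best, v)
--     return best
-- ===== Notes on version B (the rewrite author's own statement) =====
-- stated objective: alternative
-- what changed: Replaces enumeration of all C(n,r) combinations with a set-based DP over reachable OR values per pick count (dp[j] = set of OR values attainable with exactly j picks), then takes the running max of dp[r].
import Mathlib
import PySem

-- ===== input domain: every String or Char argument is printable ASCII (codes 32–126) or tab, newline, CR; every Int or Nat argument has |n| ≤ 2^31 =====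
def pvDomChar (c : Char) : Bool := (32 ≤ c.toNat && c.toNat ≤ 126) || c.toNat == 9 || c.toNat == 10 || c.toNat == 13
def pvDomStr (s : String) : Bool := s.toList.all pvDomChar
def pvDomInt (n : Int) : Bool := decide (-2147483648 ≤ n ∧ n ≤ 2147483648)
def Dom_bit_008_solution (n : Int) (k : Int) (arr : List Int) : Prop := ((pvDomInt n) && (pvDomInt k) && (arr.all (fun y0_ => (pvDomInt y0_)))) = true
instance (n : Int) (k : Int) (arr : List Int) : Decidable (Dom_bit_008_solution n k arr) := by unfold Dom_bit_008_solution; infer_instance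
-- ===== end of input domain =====

-- B replaces the enumeration of all r-combinations by a set-based DP over reachable
-- OR values per pick count (alternative algorithm, same exact result).

-- ===== PORT A =====
-- itertools.combinations(xs, r): all r-element subsequences, in itertools' order.
-- Python's '|' on int is Int.lor (two's-complement OR; same values as PySem.Int.bor).
def pvCombos : Nat → List Int → List (List Int)
  | 0, _ => [[]]
  | _ + 1, [] => []
  | r + 1, x :: t => (pvCombos r t).map (fun c => x :: c) ++ pvCombos (r + 1) t

def bit_008_solution (n : Int) (k : Int) (arr : List Int) : Int :=
  (pvCombos (min k n).toNat arr).foldl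
    (fun max_or combo =>
      max max_or (combo.foldl (fun or_val num => Int.lor or_val num) 0)) 0

-- ===== PORT B =====
-- one loop body: dp = [dp[0]] + [cur | {v | num for v in prev} for prev, cur in zip(dp, dp[1:])]
def pvStep (num : Int) (dp : List (PySem.Set Int)) : List (PySem.Set Int) :=
  dp.take 1 ++ (List.zip dp (dp.drop 1)).map
    (fun pc => PySem.Set.union pc.2 (PySem.Set.ofList (pc.1.map (fun v => Int.lor v num))))

def bit_008_solution_alt (n : Int) (k : Int) (arr : List Int) : Int :=
  let r := min k n
  let dp0 : List (PySem.Set Int) :=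
    [PySem.Set.ofList [0]] ++ (PySem.List.pyRange 0 r 1).map (fun _ => ([] : PySem.Set Int))
  let dp := arr.foldl (fun d num => pvStep num d) dp0
  (PySem.List.pyGetD dp r ([] : PySem.Set Int)).foldl (fun best v => max best v) 0

-- ===== PRECONDITION & SPEC =====
-- A raises ValueError (combinations with negative r) exactly when min(k, n) < 0; Pre_ excludes those inputs.
def Pre_bit_008_solution (n : Int) (k : Int) (arr : List Int) : Prop := 0 ≤ min k n
instance (n : Int) (k : Int) (arr : List Int) : Decidable (Pre_bit_008_solution n k arr) := by unfold Pre_bit_008_solution; infer_instance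
def pvWitness_bit_008_solution : Int × Int × List Int := (2, 2, [1, 2])

def Spec_bit_008_solution (n : Int) (k : Int) (arr : List Int) (out : Int) : Prop := out = bit_008_solution_alt n k arr
instance (n : Int) (k : Int) (arr : List Int) (out : Int) : Decidable (Spec_bit_008_solution n k arr out) := by unfold Spec_bit_008_solution; infer_instance

-- ===== CLAIM (what is proved, stated in full; the proofs are below) =====
def Claim_equal_bit_008_solution : Prop := ∀ (n : Int) (k : Int) (arr : List Int), Dom_bit_008_solution n k arr → Pre_bit_008_solution n k arr → Spec_bit_008_solution n k arr (bit_008_solution n k arr)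

-- ===== LEMMAS AND PROOFS =====

theorem pvStep_length (num : Int) (dp : List (PySem.Set Int)) :
    (pvStep num dp).length = dp.length := by
  unfold pvStep
  simp [List.length_zip]
  omega

theorem pvStep_getD (num : Int) (dp : List (PySem.Set Int)) (j : Nat) (hj : j < dp.length) :
    (pvStep num dp).getD j [] =
      if j = 0 then dp.getD 0 []
      else PySem.Set.union (dp.getD j [])
        (PySem.Set.ofList ((dp.getD (j - 1) []).map (fun v => Int.lor v num))) := by
  match dp, hj with
  | d0 :: rest, hj =>
    unfold pvStep
    match j with
    | 0 => simp
    | i + 1 =>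
      have hi : i < rest.length := by simpa using hj
      have hzipLen : (List.zip (d0 :: rest) ((d0 :: rest).drop 1)).length = rest.length := by
        simp [List.length_zip]
      simp only [List.take, List.drop, if_neg (Nat.succ_ne_zero i)]
      rw [List.getD_eq_getElem _ _ (by simpa [hzipLen] using hi)]
      rw [List.getD_eq_getElem _ _ (by simpa using hj)]
      rw [List.getD_eq_getElem _ _ (by simp; omega)]
      simp [List.getElem_zip]

theorem pvStep_mem (num : Int) (dp : List (PySem.Set Int)) (j : Nat) (hj : j < dp.length) (x : Int) :
    x ∈ (pvStep num dp).getD j [] ↔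
      x ∈ dp.getD j [] ∨ (1 ≤ j ∧ ∃ w ∈ dp.getD (j - 1) [], x = Int.lor w num) := by
  rw [pvStep_getD num dp j hj]
  by_cases h0 : j = 0
  · subst h0; simp
  · rw [if_neg h0]
    rw [PySem.Set.mem_union, PySem.Set.mem_ofList]
    simp only [List.mem_map]
    constructor
    · rintro (h | ⟨w, hw, rfl⟩)
      · exact Or.inl h
      · exact Or.inr ⟨by omega, w, hw, rfl⟩
    · rintro (h | ⟨-, w, hw, rfl⟩)
      · exact Or.inl h
      · exact Or.inr ⟨w, hw, rfl⟩

theorem pvCombos_zero (xs : List Int) : pvCombos 0 xs = [[]] := by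
  unfold pvCombos; rfl

theorem pvCombos_mem_cons (m : Nat) (num : Int) (t : List Int) (c : List Int) :
    c ∈ pvCombos m (num :: t) ↔
      c ∈ pvCombos m t ∨ (1 ≤ m ∧ ∃ c' ∈ pvCombos (m - 1) t, c = num :: c') := by
  match m with
  | 0 => simp [pvCombos_zero]
  | m + 1 =>
    show c ∈ (pvCombos m t).map (fun c => num :: c) ++ pvCombos (m + 1) t ↔ _
    simp only [List.mem_append, List.mem_map]
    constructor
    · rintro (⟨c', hc', rfl⟩ | h)
      · exact Or.inr ⟨by omega, c', by simpa using hc', rfl⟩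
      · exact Or.inl h
    · rintro (h | ⟨-, c', hc', rfl⟩)
      · exact Or.inr h
      · exact Or.inl ⟨c', by simpa using hc', rfl⟩

theorem pvFold_mem (xs : List Int) :
    ∀ (dp : List (PySem.Set Int)) (j : Nat), j < dp.length → ∀ x : Int,
      (x ∈ (xs.foldl (fun d num => pvStep num d) dp).getD j [] ↔
        ∃ m, m ≤ j ∧ ∃ c ∈ pvCombos m xs, ∃ v ∈ dp.getD (j - m) [],
          x = c.foldl (fun a b => Int.lor a b) v) := by
  induction xs with
  | nil =>
    intro dp j hj x
    simp only [List.foldl_nil]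
    constructor
    · intro hx
      exact ⟨0, Nat.zero_le _, [], by simp [pvCombos_zero], x, by simpa using hx, rfl⟩
    · rintro ⟨m, hm, c, hc, v, hv, rfl⟩
      match m with
      | 0 =>
        rw [pvCombos_zero] at hc
        simp only [List.mem_singleton] at hc
        subst hc
        simpa using hv
      | m + 1 => exact absurd hc (by simp [pvCombos])
  | cons num t ih =>
    intro dp j hj x
    simp only [List.foldl_cons]
    have hlen : j < (pvStep num dp).length := by rw [pvStep_length]; exact hj
    rw [ih (pvStep num dp) j hlen x]
    constructor
    · rintro ⟨m, hm, c, hc, v, hv, rfl⟩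
      rw [pvStep_mem num dp (j - m) (by omega)] at hv
      rcases hv with hv | ⟨h1, w, hw, rfl⟩
      · exact ⟨m, hm, c, (pvCombos_mem_cons m num t c).2 (Or.inl hc), v, hv, rfl⟩
      · refine ⟨m + 1, by omega, num :: c,
          (pvCombos_mem_cons (m + 1) num t (num :: c)).2 (Or.inr ⟨by omega, c, by simpa using hc, rfl⟩),
          w, ?_, ?_⟩
        · have : j - (m + 1) = j - m - 1 := by omega
          rw [this]; exact hw
        · simp [List.foldl_cons]
    · rintro ⟨m, hm, c, hc, v, hv, rfl⟩
      rw [pvCombos_mem_cons m num t c] at hc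
      rcases hc with hc | ⟨h1, c', hc', rfl⟩
      · exact ⟨m, hm, c, hc, v,
          (pvStep_mem num dp (j - m) (by omega) v).2 (Or.inl hv), rfl⟩
      · refine ⟨m - 1, by omega, c', hc', Int.lor v num, ?_, ?_⟩
        · refine (pvStep_mem num dp (j - (m - 1)) (by omega) _).2 (Or.inr ⟨by omega, v, ?_, rfl⟩)
          have : j - (m - 1) - 1 = j - m := by omega
          rw [this]; exact hv
        · simp [List.foldl_cons]
    
theorem pvMapConst_getD (L : List Int) (i : Nat) :
    ((L.map (fun _ => ([] : PySem.Set Int))).getD i []) = [] := by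
  induction L generalizing i with
  | nil => simp
  | cons a t ih =>
    match i with
    | 0 => simp
    | i + 1 => simp only [List.map_cons, List.getD_cons_succ]; exact ih i

theorem pvFoldlMax_le (l1 l2 : List Int) (h : ∀ x ∈ l1, x ∈ l2) :
    l1.foldl max 0 ≤ l2.foldl max 0 := by
  rcases PySem.List.foldl_max_mem l1 0 with h0 | hmem
  · rw [h0]; exact (PySem.List.le_foldl_max l2 0).1
  · exact (PySem.List.le_foldl_max l2 0).2 _ (h _ hmem)

theorem pvFoldlMax_eq (l1 l2 : List Int) (h : ∀ x, x ∈ l1 ↔ x ∈ l2) :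
    l1.foldl max 0 = l2.foldl max 0 :=
  le_antisymm (pvFoldlMax_le l1 l2 (fun x hx => (h x).1 hx))
    (pvFoldlMax_le l2 l1 (fun x hx => (h x).2 hx))

-- ===== VERDICT (by name: the statement is the Claim_ definition above) =====
theorem bit_008_solution_spec : Claim_equal_bit_008_solution := by
  intro n k arr _ hpre
  unfold Spec_bit_008_solution bit_008_solution bit_008_solution_alt
  simp only []
  have hpre' : (0 : Int) ≤ min k n := hpre
  set r : Nat := (min k n).toNat with hr
  have hcast : ((r : Int)) = min k n := Int.toNat_of_nonneg hpre'
  -- the DP's initial list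
  set dp0 : List (PySem.Set Int) :=
    [PySem.Set.ofList [0]] ++ (PySem.List.pyRange 0 (min k n) 1).map (fun _ => ([] : PySem.Set Int)) with hdp0
  have hlen0 : dp0.length = r + 1 := by
    simp [hdp0, PySem.List.length_pyRange_one]
    omega
  have hget0 : dp0.getD 0 [] = [0] := by simp [hdp0]; rfl
  have hgetpos : ∀ i : Nat, 1 ≤ i → dp0.getD i [] = [] := by
    intro i hi
    match i, hi with
    | i + 1, _ =>
      simp only [hdp0, List.cons_append, List.nil_append, List.getD]
      rw [show (PySem.Set.ofList [0] :: (PySem.List.pyRange 0 (min k n) 1).map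
          (fun _ => ([] : PySem.Set Int)))[i+1]?.getD [] =
          ((PySem.List.pyRange 0 (min k n) 1).map (fun _ => ([] : PySem.Set Int))).getD i []
        from by simp [List.getD]]
      exact pvMapConst_getD _ i
  -- membership in the final dp[r]
  have hmem : ∀ x : Int,
      x ∈ (arr.foldl (fun d num => pvStep num d) dp0).getD r [] ↔
        ∃ c ∈ pvCombos r arr, x = c.foldl (fun a b => Int.lor a b) 0 := by
    intro x
    rw [pvFold_mem arr dp0 r (by omega) x]
    constructor
    · rintro ⟨m, hm, c, hc, v, hv, rfl⟩
      rcases Nat.lt_or_ge m r with hmr | hmr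
      · rw [hgetpos (r - m) (by omega)] at hv
        simp at hv
      · have : m = r := by omega
        subst this
        rw [Nat.sub_self, hget0] at hv
        simp only [List.mem_singleton] at hv
        subst hv
        exact ⟨c, hc, rfl⟩
    · rintro ⟨c, hc, rfl⟩
      exact ⟨r, le_refl r, c, hc, 0, by rw [Nat.sub_self, hget0]; simp, rfl⟩
  -- the Int index (min k n) reads final dp at Nat index r
  have hidx : PySem.List.pyGetD (arr.foldl (fun d num => pvStep num d) dp0) (min k n)
      ([] : PySem.Set Int) = (arr.foldl (fun d num => pvStep num d) dp0).getD r [] := by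
    rw [← hcast, PySem.List.pyGetD_natCast]
  -- A's fold is a running max over the mapped OR values
  have hA : (pvCombos r arr).foldl
      (fun max_or combo => max max_or (combo.foldl (fun or_val num => Int.lor or_val num) 0)) 0
      = ((pvCombos r arr).map
          (fun combo => combo.foldl (fun a b => Int.lor a b) 0)).foldl max 0 := by
    rw [List.foldl_map]
  rw [hA, hidx]
  refine pvFoldlMax_eq _ _ ?_
  intro x
  rw [hmem x]
  simp only [List.mem_map]
  constructor
  · rintro ⟨c, hc, rfl⟩; exact ⟨c, hc, rfl⟩
  · rintro ⟨c, hc, rfl⟩; exact ⟨c, hc, rfl⟩
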